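-- pv_equiv track=rewrite | github.com/dmuratli/ens210-fall2022-group-project | tools.py | gap_pass
-- ===== SOURCE A (Python) =====
-- def gap_pass(sequence, loc): #Returns the gapped position of a location in a gapless sequence
--     pos = 0
--     counter = 0
--
--     for x in sequence:
--         if pos < loc:
--             if x == "-":
--                 counter += 1
--                 continue
--             else:
--                 counter += 1
--                 pos += 1
--
--     return counter
-- ===== SOURCE B (Python) =====
-- def gap_pass(sequence, loc):
--     # Build the index table of non-gap characters once, then random-access lookup.
--     positions = [i for i, x in enumerate(sequence) if x != '-']
--     if loc <= 0:
--         return 0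
--     if loc > len(positions):
--         return len(sequence)
--     return positions[loc - 1] + 1
-- ===== Notes on version B (the rewrite author's own statement) =====
-- stated objective: alternative
-- what changed: Replaces the running pos/counter scan with a precomputed index table of non-gap positions and a single random-access lookup (positions[loc-1]+1), with direct closed-form answers for loc<=0 and loc beyond the number of non-gap characters.
import Mathlib
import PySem

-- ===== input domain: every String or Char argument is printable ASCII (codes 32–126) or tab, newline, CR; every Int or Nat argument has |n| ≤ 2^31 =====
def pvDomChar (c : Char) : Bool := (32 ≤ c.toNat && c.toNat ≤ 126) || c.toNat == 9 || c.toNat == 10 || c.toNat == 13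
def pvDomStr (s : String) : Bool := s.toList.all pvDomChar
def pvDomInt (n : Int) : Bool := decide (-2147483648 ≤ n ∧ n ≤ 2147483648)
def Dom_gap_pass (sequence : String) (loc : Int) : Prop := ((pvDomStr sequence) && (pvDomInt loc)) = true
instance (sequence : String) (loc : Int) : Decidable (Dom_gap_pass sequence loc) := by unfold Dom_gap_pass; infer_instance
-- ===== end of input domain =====

-- B replaces A's running pos/counter scan by a precomputed table of non-gap positions
-- plus one random-access lookup (alternative decomposition, same cost).


-- ===== PORT A =====
def gap_pass (sequence : String) (loc : Int) : Int :=
  let st := sequence.toList.foldl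
    (fun (st : Int × Int) x =>
      if st.1 < loc then
        if x = '-' then (st.1, st.2 + 1) else (st.1 + 1, st.2 + 1)
      else st)
    (0, 0)
  st.2

-- ===== PORT B =====
-- [i for i, x in enumerate(sequence) if x != '-'], transcribed with an index accumulator
def gpPositions : List Char → Int → List Int
  | [], _ => []
  | x :: xs, i => if x ≠ '-' then i :: gpPositions xs (i + 1) else gpPositions xs (i + 1)

def gap_pass_alt (sequence : String) (loc : Int) : Int :=
  let positions := gpPositions sequence.toList 0
  if loc ≤ 0 then 0
  else if loc > positions.length then (sequence.toList.length : Int)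
  else ((PySem.List.pyGet? positions (loc - 1)).getD 0) + 1  -- in range here: positions[loc-1]

-- ===== PRECONDITION & SPEC =====
def Spec_gap_pass (sequence : String) (loc : Int) (out : Int) : Prop := out = gap_pass_alt sequence loc
instance (sequence : String) (loc : Int) (out : Int) : Decidable (Spec_gap_pass sequence loc out) := by unfold Spec_gap_pass; infer_instance

-- ===== CLAIM (what is proved, stated in full; the proofs are below) =====
def Claim_equal_gap_pass : Prop := ∀ (sequence : String) (loc : Int), Dom_gap_pass sequence loc → Spec_gap_pass sequence loc (gap_pass sequence loc)

-- ===== LEMMAS AND PROOFS =====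

-- A's loop, re-expressed as structural recursion on the remaining characters with the
-- remaining budget loc - pos.
def gpLoop : List Char → Int → Int
  | [], _ => 0
  | x :: xs, loc => if 0 < loc then 1 + gpLoop xs (if x = '-' then loc else loc - 1) else 0


lemma gp_fold_const (xs : List Char) (loc pos c : Int) (h : ¬ pos < loc) :
    xs.foldl
      (fun (st : Int × Int) x =>
        if st.1 < loc then
          if x = '-' then (st.1, st.2 + 1) else (st.1 + 1, st.2 + 1)
        else st)
      (pos, c) = (pos, c) := by
  induction xs with
  | nil => rfl
  | cons x xs ih =>
    simp only [List.foldl_cons, if_neg h]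
    exact ih

lemma gpLoop_nonpos (xs : List Char) (loc : Int) (h : loc ≤ 0) : gpLoop xs loc = 0 := by
  cases xs with
  | nil => rfl
  | cons y ys => simp [gpLoop, show ¬ 0 < loc from by omega]

lemma gp_fold_eq (xs : List Char) (loc pos c : Int) :
    (xs.foldl
      (fun (st : Int × Int) x =>
        if st.1 < loc then
          if x = '-' then (st.1, st.2 + 1) else (st.1 + 1, st.2 + 1)
        else st)
      (pos, c)).2 = c + gpLoop xs (loc - pos) := by
  induction xs generalizing pos c with
  | nil => simp [gpLoop]
  | cons x xs ih =>
    simp only [List.foldl_cons, gpLoop]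
    by_cases h : pos < loc
    · simp only [if_pos h, if_pos (by omega : (0:Int) < loc - pos)]
      by_cases hx : x = '-'
      · simp only [if_pos hx, ih]
        omega
      · simp only [if_neg hx, ih]
        have : loc - (pos + 1) = loc - pos - 1 := by omega
        rw [this]; omega
    · simp only [if_neg h]
      rw [gp_fold_const xs loc pos c h, gpLoop_nonpos xs _ (by omega)]
      omega

lemma gpPositions_shift (xs : List Char) (i k : Int) :
    gpPositions xs (i + k) = (gpPositions xs i).map (· + k) := by
  induction xs generalizing i with
  | nil => simp [gpPositions]
  | cons x xs ih =>
    by_cases hx : x = '-' <;>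
      simp [gpPositions, hx, show i + k + 1 = (i + 1) + k by omega, ih]

lemma gpLoop_eq_alt (xs : List Char) (loc : Int) :
    gpLoop xs loc =
      (if loc ≤ 0 then 0
       else if loc > (gpPositions xs 0).length then (xs.length : Int)
       else ((PySem.List.pyGet? (gpPositions xs 0) (loc - 1)).getD 0) + 1) := by
  induction xs generalizing loc with
  | nil =>
    simp only [gpLoop, gpPositions, List.length_nil, Nat.cast_zero]
    split_ifs <;> first | rfl | omega
  | cons x xs ih =>
    have hshift : gpPositions xs 1 = (gpPositions xs 0).map (· + 1) := by
      simpa using gpPositions_shift xs 0 1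
    by_cases hl : 0 < loc
    · by_cases hx : x = '-'
      · have hpos : gpPositions (x :: xs) 0 = (gpPositions xs 0).map (· + 1) := by
          simp [gpPositions, hx, hshift]
        have hstep : gpLoop (x :: xs) loc = 1 + gpLoop xs loc := by
          simp [gpLoop, hl, hx]
        rw [hstep, hpos, ih loc, List.length_map]
        by_cases hgt : loc > ((gpPositions xs 0).length : Int)
        · rw [if_neg (show ¬ loc ≤ 0 by omega), if_neg (show ¬ loc ≤ 0 by omega),
              if_pos hgt, if_pos hgt]
          push_cast [List.length_cons]; ring
        · have hk : (loc - 1).toNat < (gpPositions xs 0).length := by omega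
          rw [if_neg (show ¬ loc ≤ 0 by omega), if_neg (show ¬ loc ≤ 0 by omega),
              if_neg hgt, if_neg hgt]
          simp only [PySem.List.pyGet?_of_nonneg _ (show (0:Int) ≤ loc - 1 by omega),
            List.getElem?_map, List.getElem?_eq_getElem hk, Option.map_some,
            Option.getD_some]
          ring
      · have hpos : gpPositions (x :: xs) 0 = 0 :: (gpPositions xs 0).map (· + 1) := by
          simp [gpPositions, hx, hshift]
        have hstep : gpLoop (x :: xs) loc = 1 + gpLoop xs (loc - 1) := by
          simp [gpLoop, hl, hx]
        rw [hstep, hpos, ih (loc - 1)]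
        simp only [List.length_cons, List.length_map]
        by_cases hgt : loc > ((gpPositions xs 0).length : Int) + 1
        · rw [if_neg (show ¬ loc - 1 ≤ 0 by omega),
              if_pos (show loc - 1 > ((gpPositions xs 0).length : Int) by omega),
              if_neg (show ¬ loc ≤ 0 by omega),
              if_pos (show loc > (((gpPositions xs 0).length + 1 : Nat) : Int) by push_cast; omega)]
          push_cast [List.length_cons]; ring
        · rw [if_neg (show ¬ loc ≤ 0 by omega),
              if_neg (show ¬ loc > (((gpPositions xs 0).length + 1 : Nat) : Int) by push_cast; omega)]
          by_cases h1 : loc = 1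
          · subst h1
            rw [if_pos (show (1:Int) - 1 ≤ 0 by omega)]
            simp [PySem.List.pyGet?, PySem.List.pyIdx?]
          · have hk : (loc - 2).toNat < (gpPositions xs 0).length := by omega
            rw [if_neg (show ¬ loc - 1 ≤ 0 by omega),
                if_neg (show ¬ loc - 1 > ((gpPositions xs 0).length : Int) by omega),
                PySem.List.pyGet?_of_nonneg _ (show (0:Int) ≤ loc - 1 by omega),
                PySem.List.pyGet?_of_nonneg _ (show (0:Int) ≤ loc - 1 - 1 by omega),
                show (loc - 1).toNat = (loc - 2).toNat + 1 from by omega,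
                show (loc - 1 - 1).toNat = (loc - 2).toNat from by omega,
                List.getElem?_cons_succ, List.getElem?_map,
                List.getElem?_eq_getElem hk]
            simp only [Option.map_some, Option.getD_some]
            ring
    · rw [show gpLoop (x :: xs) loc = 0 from by simp [gpLoop, hl],
          if_pos (show loc ≤ 0 by omega)]

-- ===== VERDICT (by name: the statement is the Claim_ definition above) =====
theorem gap_pass_spec : Claim_equal_gap_pass := by
  intro s loc _
  show gap_pass s loc = gap_pass_alt s loc
  unfold gap_pass gap_pass_alt
  simp only [gp_fold_eq s.toList loc 0 0, sub_zero, zero_add, gpLoop_eq_alt]
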